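-- pv_equiv track=rewrite | github.com/flongy72/Advent_of_Code | 2016/Day_16/advent_2016_day16.py | dragon_curve
-- ===== SOURCE A (Python) =====
-- def dragon_curve(string, disk):
--     a = string
--     b = a
--     reverse = b[::-1]
--     new_reverse = ""
--     for digit in reverse:
--         if digit == "0":
--             new_reverse += "1"
--         else:
--             new_reverse += "0"
--     result = a + "0" + new_reverse
--     if len(result) < disk:
--         return dragon_curve(result, disk)
--     else:
--         return result
-- ===== SOURCE B (Python) =====
-- def dragon_curve(string, disk):
--     a = string
--     while True:
--         a = a + "0" + "".join("1" if c == "0" else "0" for c in a)[::-1]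
--         if len(a) >= disk:
--             return a
-- ===== Notes on version B (the rewrite author's own statement) =====
-- stated objective: idiomatic
-- what changed: Tail recursion replaced by an iterative do-while loop that doubles unconditionally then tests, and the character-by-character string-concatenation complement over the reversed string is replaced by a join of a comprehension complementing the string and then slice-reversing it.
import Mathlib
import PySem

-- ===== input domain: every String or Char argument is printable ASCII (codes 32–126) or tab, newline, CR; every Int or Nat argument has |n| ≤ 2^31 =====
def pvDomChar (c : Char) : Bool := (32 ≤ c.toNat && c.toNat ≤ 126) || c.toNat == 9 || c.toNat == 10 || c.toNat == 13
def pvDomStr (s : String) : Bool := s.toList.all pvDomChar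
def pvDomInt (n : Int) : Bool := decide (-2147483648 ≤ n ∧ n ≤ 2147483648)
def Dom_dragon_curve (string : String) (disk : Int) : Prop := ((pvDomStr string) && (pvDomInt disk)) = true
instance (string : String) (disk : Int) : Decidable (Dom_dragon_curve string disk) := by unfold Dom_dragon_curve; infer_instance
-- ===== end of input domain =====

-- B replaces A's tail recursion by an iterative do-while loop and builds the complement by
-- mapping over the string then reversing, instead of char-by-char appends over the reversal.

-- ===== PORT A =====
-- the for-loop of A: new_reverse accumulated by += over the reversed string
def pvCompA (reverse : List Char) : List Char :=
  reverse.foldl (fun acc digit => acc ++ [if digit = '0' then '1' else '0']) []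

-- length fact needed for A's termination (cited in decreasing_by)
theorem pvCompA_length (l : List Char) : (pvCompA l).length = l.length := by
  suffices h : ∀ (l acc : List Char),
      (l.foldl (fun acc digit => acc ++ [if digit = '0' then '1' else '0']) acc).length
        = acc.length + l.length by
    simpa [pvCompA] using h l []
  intro l
  induction l with
  | nil => intro acc; simp
  | cons d t ih => intro acc; rw [List.foldl_cons, ih]; simp; omega

def dcA (a : List Char) (disk : Int) : List Char :=
  let reverse := a.reverse
  let new_reverse := pvCompA reverse
  let result := a ++ '0' :: new_reverse
  if (result.length : Int) < disk then dcA result disk else result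
termination_by (disk - a.length).toNat
decreasing_by
  simp only [result, new_reverse, reverse, List.length_append, List.length_cons,
    pvCompA_length] at *
  omega

def dragon_curve (string : String) (disk : Int) : String :=
  String.ofList (dcA string.toList disk)

-- ===== PORT B =====
-- one do-while pass: a = a + "0" + complement(a) reversed
def pvStepB (a : List Char) : List Char :=
  a ++ '0' :: (a.map (fun c => if c = '0' then '1' else '0')).reverse

theorem pvStepB_length (a : List Char) : (pvStepB a).length = 2 * a.length + 1 := by
  simp [pvStepB]; omega

def dcB (a : List Char) (disk : Int) : List Char :=
  let a' := pvStepB a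
  if disk ≤ (a'.length : Int) then a' else dcB a' disk
termination_by (disk - a.length).toNat
decreasing_by
  simp only [a', pvStepB_length] at *
  omega

def dragon_curve_alt (string : String) (disk : Int) : String :=
  String.ofList (dcB string.toList disk)

-- ===== PRECONDITION & SPEC =====
def Spec_dragon_curve (string : String) (disk : Int) (out : String) : Prop := out = dragon_curve_alt string disk
instance (string : String) (disk : Int) (out : String) : Decidable (Spec_dragon_curve string disk out) := by unfold Spec_dragon_curve; infer_instance

-- ===== CLAIM =====
def Claim_equal_dragon_curve : Prop := ∀ (string : String) (disk : Int), Dom_dragon_curve string disk → Spec_dragon_curve string disk (dragon_curve string disk)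

-- ===== LEMMAS AND PROOFS =====
theorem pvCompA_eq_map (l : List Char) :
    pvCompA l = l.map (fun c => if c = '0' then '1' else '0') := by
  suffices h : ∀ (l acc : List Char),
      l.foldl (fun acc digit => acc ++ [if digit = '0' then '1' else '0']) acc
        = acc ++ l.map (fun c => if c = '0' then '1' else '0') by
    simpa [pvCompA] using h l []
  intro l
  induction l with
  | nil => intro acc; simp
  | cons d t ih => intro acc; simp [List.foldl, ih]

theorem dcA_eq_dcB (a : List Char) (disk : Int) : dcA a disk = dcB a disk := by
  rw [dcA.eq_def, dcB.eq_def]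
  have hstep : a ++ '0' :: pvCompA a.reverse = pvStepB a := by
    simp [pvStepB, pvCompA_eq_map, List.map_reverse]
  simp only [hstep]
  by_cases h : disk ≤ ((pvStepB a).length : Int)
  · rw [if_neg (by omega), if_pos h]
  · rw [if_pos (by omega), if_neg h]
    exact dcA_eq_dcB (pvStepB a) disk
termination_by (disk - a.length).toNat
decreasing_by
  simp only [pvStepB_length] at *
  omega

-- ===== VERDICT =====
theorem dragon_curve_spec : Claim_equal_dragon_curve := by
  intro string disk _
  unfold Spec_dragon_curve dragon_curve dragon_curve_alt
  rw [dcA_eq_dcB]
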